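-- pv_equiv track=rewrite | github.com/Uwphwu/AdventOfCode | Tag10.py | Aufgabe1
-- ===== SOURCE A (Python) =====
-- def Aufgabe1(Zahlen):
--     """Zählt die Anzahl von Elementen in einem übergebenen Array, die die Differenz 1 zu ihrem Vorgänger haben. Das selbe macht es mit Elementen die Differenz 3 haben.
--     Diese beiden Anzahlen werden dann am Ende multipliziert und returnt"""
--
--     EinserSchritt = 0
--     DreierSchritt = 0
--
--     for i in range(len(Zahlen)-1):
--         if Zahlen[i+1]-Zahlen[i] == 1:
--             EinserSchritt += 1
--         if Zahlen[i+1]-Zahlen[i] == 3: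
--             DreierSchritt += 1
--     return EinserSchritt*DreierSchritt
-- ===== SOURCE B (Python) =====
-- def _bisect_left(s, x):
--     lo, hi = 0, len(s)
--     while lo < hi:
--         mid = (lo + hi) // 2
--         if s[mid] < x:
--             lo = mid + 1
--         else:
--             hi = mid
--     return lo
--
--
-- def _bisect_right(s, x):
--     lo, hi = 0, len(s)
--     while lo < hi:
--         mid = (lo + hi) // 2
--         if x < s[mid]:
--             hi = mid
--         else:
--             lo = mid + 1
--     return lo
--
--
-- def Aufgabe1(Zahlen):
--     # Sort the consecutive differences, then locate the run of 1s and the run of 3s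
--     # by binary search: the length of each run is bisect_right - bisect_left.
--     diffs = [b - a for a, b in zip(Zahlen, Zahlen[1:])]
--     s = sorted(diffs)
--     ones = _bisect_right(s, 1) - _bisect_left(s, 1)
--     threes = _bisect_right(s, 3) - _bisect_left(s, 3)
--     return ones * threes
-- ===== Notes on version B (the rewrite author's own statement) =====
-- stated objective: alternative
-- what changed: B replaces A's single interleaved two-counter index loop by a sort-then-binary-search algorithm: it builds the list of consecutive differences, sorts it, and obtains each of the two needed counts as the length of a sorted run located by hand-written bisect_left/bisect_right; correct because in a sorted list all copies of a value are contiguous.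
import Mathlib
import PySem

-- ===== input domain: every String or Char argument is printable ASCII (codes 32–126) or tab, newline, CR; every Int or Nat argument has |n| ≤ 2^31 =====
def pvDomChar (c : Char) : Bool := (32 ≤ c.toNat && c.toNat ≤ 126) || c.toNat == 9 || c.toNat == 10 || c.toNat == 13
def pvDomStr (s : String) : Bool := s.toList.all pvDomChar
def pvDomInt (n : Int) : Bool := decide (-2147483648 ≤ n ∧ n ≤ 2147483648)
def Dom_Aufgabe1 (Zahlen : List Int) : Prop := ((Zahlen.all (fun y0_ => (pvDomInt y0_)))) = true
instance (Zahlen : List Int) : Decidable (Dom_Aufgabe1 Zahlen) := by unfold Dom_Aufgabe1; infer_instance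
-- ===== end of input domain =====

-- B sorts the list of consecutive differences and reads each of the two counts as the
-- length of a sorted run located by binary search (alternative algorithm; not faster).

-- ===== PORT A =====
-- A: loop i in range(len-1), two inline counters updated by branches on Zahlen[i+1]-Zahlen[i].
def Aufgabe1 (Zahlen : List Int) : Int :=
  let st := (PySem.List.pyRange 0 ((Zahlen.length : Int) - 1) 1).foldl
    (fun (st : Int × Int) i =>
      let e := if PySem.List.pyGetD Zahlen (i + 1) 0 - PySem.List.pyGetD Zahlen i 0 = 1
               then st.1 + 1 else st.1
      let d := if PySem.List.pyGetD Zahlen (i + 1) 0 - PySem.List.pyGetD Zahlen i 0 = 3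
               then st.2 + 1 else st.2
      (e, d)) (0, 0)
  st.1 * st.2

-- ===== PORT B =====
-- B: diffs list, sorted; each count is bisect_right - bisect_left on the sorted list.
-- Source B's hand-written _bisect_left/_bisect_right are exactly the lo/hi halving loop that
-- PySem.List.bisectLeft / bisectRight implement (mid = (lo+hi)//2, same branch tests).
def Aufgabe1_alt (Zahlen : List Int) : Int :=
  let diffs := (Zahlen.zip (Zahlen.drop 1)).map (fun p => p.2 - p.1)
  let s := PySem.List.sorted diffs (fun x => x) false
  let ones : Int := (PySem.List.bisectRight s 1 : Int) - (PySem.List.bisectLeft s 1 : Int)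
  let threes : Int := (PySem.List.bisectRight s 3 : Int) - (PySem.List.bisectLeft s 3 : Int)
  ones * threes

-- ===== PRECONDITION & SPEC =====
def Spec_Aufgabe1 (Zahlen : List Int) (out : Int) : Prop := out = Aufgabe1_alt Zahlen
instance (Zahlen : List Int) (out : Int) : Decidable (Spec_Aufgabe1 Zahlen out) := by unfold Spec_Aufgabe1; infer_instance

-- ===== CLAIM =====
def Claim_equal_Aufgabe1 : Prop := ∀ (Zahlen : List Int), Dom_Aufgabe1 Zahlen → Spec_Aufgabe1 Zahlen (Aufgabe1 Zahlen)

-- ===== LEMMAS AND PROOFS =====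

-- A's pair fold over any value list is (count of 1s, count of 3s) added to the start state.
lemma pair_fold_counts (l : List Int) (e d : Int) :
    l.foldl (fun (st : Int × Int) v =>
      (if v - 0 = 1 then st.1 + 1 else st.1, if v - 0 = 3 then st.2 + 1 else st.2)) (e, d)
      = (e + l.countP (· = 1), d + l.countP (· = 3)) := by
  induction l generalizing e d with
  | nil => simp
  | cons x xs ih =>
    simp only [List.foldl_cons, List.countP_cons, ih]
    split_ifs <;> simp_all <;> ring

-- the index list A iterates over, mapped to its difference values, is B's diffs list
lemma range_map_eq_diffs (xs : List Int) :
    (PySem.List.pyRange 0 ((xs.length : Int) - 1) 1).map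
      (fun i => PySem.List.pyGetD xs (i + 1) 0 - PySem.List.pyGetD xs i 0)
      = (xs.zip (xs.drop 1)).map (fun p => p.2 - p.1) := by
  apply List.ext_getElem
  · simp [PySem.List.length_pyRange_one]
  · intro k h1 h2
    have hk : k < xs.length - 1 := by
      simpa [PySem.List.length_pyRange_one] using h1
    have hk1 : k + 1 < xs.length := by omega
    simp only [List.getElem_map, PySem.List.getElem_pyRange_one, List.getElem_zip,
      List.getElem_drop]
    have h0 : (0 : Int) + (k : Int) = ((k : Nat) : Int) := by ring
    rw [h0]
    have e1 : PySem.List.pyGetD xs (((k : Nat) : Int) + 1) 0 = xs[k + 1] := by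
      rw [show (((k : Nat) : Int) + 1) = (((k + 1 : Nat)) : Int) by push_cast; ring,
        PySem.List.pyGetD_natCast]
      simp [List.getD_eq_getElem?_getD, List.getElem?_eq_getElem hk1]
    have e2 : PySem.List.pyGetD xs ((k : Nat) : Int) 0 = xs[k] := by
      simp [PySem.List.pyGetD_natCast, List.getD_eq_getElem?_getD,
        List.getElem?_eq_getElem (by omega : k < xs.length)]
    rw [e1, e2]
    simp [Nat.add_comm]

-- a predicate true on exactly the first n positions has countP = n
lemma countP_eq_of_prefix (p : Int → Bool) :
    ∀ (xs : List Int) (n : Nat), n ≤ xs.length →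
    (∀ j (hj : j < xs.length), j < n → p xs[j]) →
    (∀ j (hj : j < xs.length), n ≤ j → ¬ p xs[j]) →
    xs.countP p = n := by
  intro xs
  induction xs with
  | nil => intro n hn _ _; simp only [List.length_nil, Nat.le_zero] at hn; simp [hn]
  | cons a t ih =>
    intro n hn h1 h2
    cases n with
    | zero =>
      apply List.countP_eq_zero.mpr
      intro y hy
      obtain ⟨j, hj, rfl⟩ := List.mem_iff_getElem.mp hy
      exact h2 j hj (Nat.zero_le j)
    | succ m =>
      have hpa : p a = true := h1 0 (by simp) (Nat.succ_pos m)
      have ht : t.countP p = m := by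
        apply ih m (by simpa using Nat.succ_le_succ_iff.mp (by simpa using hn))
        · intro j hj hjm
          have := h1 (j + 1) (by simpa using Nat.succ_lt_succ hj) (Nat.succ_lt_succ hjm)
          simpa using this
        · intro j hj hjm
          have := h2 (j + 1) (by simpa using Nat.succ_lt_succ hj) (Nat.succ_le_succ hjm)
          simpa using this
      simp [hpa, ht]

-- counting ≤ x splits into counting < x plus counting = x (any list)
lemma countP_le_split (x : Int) : ∀ (l : List Int),
    l.countP (fun y => decide (y ≤ x)) = l.countP (fun y => decide (y < x)) + l.count x := by
  intro l
  induction l with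
  | nil => simp
  | cons a t ih =>
    simp only [List.countP_cons, List.count_cons, ih]
    by_cases h1 : a < x <;> by_cases h2 : a = x <;>
      simp [h1, h2, le_of_lt] <;> omega

-- on a sorted list, bisect_right - bisect_left is the count of x in the original list
lemma run_length (l : List Int) (x : Int) :
    (PySem.List.bisectRight (PySem.List.sorted l (fun y => y) false) x : Int)
      - (PySem.List.bisectLeft (PySem.List.sorted l (fun y => y) false) x : Int)
      = (l.count x : Int) := by
  set s := PySem.List.sorted l (fun y => y) false with hs
  have hsorted : List.Pairwise (fun a b => a ≤ b) s := by
    simpa using PySem.List.sorted_pairwise l (fun y => y)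
  obtain ⟨hL1, hL2, hL3⟩ := PySem.List.bisectLeft_spec s x hsorted
  obtain ⟨hR1, hR2, hR3⟩ := PySem.List.bisectRight_spec s x hsorted
  have hbl : s.countP (fun y => decide (y < x)) = PySem.List.bisectLeft s x := by
    apply countP_eq_of_prefix _ s _ hL1
    · intro j hj hjn; simpa using hL2 j hj hjn
    · intro j hj hjn; simpa using not_lt.mpr (hL3 j hj hjn)
  have hbr : s.countP (fun y => decide (y ≤ x)) = PySem.List.bisectRight s x := by
    apply countP_eq_of_prefix _ s _ hR1
    · intro j hj hjn; simpa using hR2 j hj hjn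
    · intro j hj hjn; simpa using not_le.mpr (hR3 j hj hjn)
  have hsplit := countP_le_split x s
  have hperm : s.count x = l.count x :=
    (PySem.List.sorted_perm l (fun y => y) false).count_eq x
  rw [hbl, hbr, hperm] at hsplit
  omega

-- ===== VERDICT =====
theorem Aufgabe1_spec : Claim_equal_Aufgabe1 := by
  intro Zahlen _
  simp only [Spec_Aufgabe1, Aufgabe1, Aufgabe1_alt]
  have hstep : (fun (st : Int × Int) i =>
        let e := if PySem.List.pyGetD Zahlen (i + 1) 0 - PySem.List.pyGetD Zahlen i 0 = 1
                 then st.1 + 1 else st.1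
        let d := if PySem.List.pyGetD Zahlen (i + 1) 0 - PySem.List.pyGetD Zahlen i 0 = 3
                 then st.2 + 1 else st.2
        (e, d))
      = (fun (st : Int × Int) i =>
        (fun (st : Int × Int) v => (if v - 0 = 1 then st.1 + 1 else st.1,
                                    if v - 0 = 3 then st.2 + 1 else st.2)) st
          ((fun i => PySem.List.pyGetD Zahlen (i + 1) 0 - PySem.List.pyGetD Zahlen i 0) i)) := by
    funext st i; simp
  rw [hstep]
  have hm : ((PySem.List.pyRange 0 ((Zahlen.length : Int) - 1) 1).map
        (fun i => PySem.List.pyGetD Zahlen (i + 1) 0 - PySem.List.pyGetD Zahlen i 0)).foldl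
        (fun (st : Int × Int) v => (if v - 0 = 1 then st.1 + 1 else st.1,
                                    if v - 0 = 3 then st.2 + 1 else st.2)) ((0 : Int), (0 : Int))
      = (PySem.List.pyRange 0 ((Zahlen.length : Int) - 1) 1).foldl
        (fun (st : Int × Int) i =>
          (fun (st : Int × Int) v => (if v - 0 = 1 then st.1 + 1 else st.1,
                                      if v - 0 = 3 then st.2 + 1 else st.2)) st
            ((fun i => PySem.List.pyGetD Zahlen (i + 1) 0 - PySem.List.pyGetD Zahlen i 0) i))
        ((0 : Int), (0 : Int)) := by
    rw [List.foldl_map]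
  rw [range_map_eq_diffs] at hm
  rw [← hm, pair_fold_counts]
  rw [run_length, run_length]
  have hpq : ∀ (c : Int) (l : List Int),
      l.countP (fun x : Int => decide (x = c)) = l.count c := by
    intro c l
    have he : (fun x : Int => decide (x = c)) = (fun x : Int => x == c) := by
      funext x; rw [Bool.eq_iff_iff]; simp
    rw [List.count_eq_countP, he]
  simp only [hpq, zero_add]
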